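-- pv_equiv track=rewrite | github.com/tinyhhj/algorithm | src/codejam/r1a/q1/Solution.py | dfs
-- ===== SOURCE A (Python) =====
-- def dfs(mat, path,visit,r,c):
--     # visit
--     path.append((r, c))
--     visit[r][c] = True
--
--     if len(path) == len(visit)*len(visit[0]):
--         return True
--
--     for i in mat[r][c]:
--         if not visit[i[0]][i[1]]:
--             if dfs(mat,path,visit,i[0],i[1]):
--                 return True
--
--     path.pop()
--     visit[r][c]= False
-- ===== SOURCE B (Python) =====
-- def dfs(mat, path, visit, r, c):
--     # Iterative depth-first search: an explicit stack of frames [row, col, cursor],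
--     # where cursor is the index of the last neighbor tried (-1 = just entered).
--     total = len(visit) * len(visit[0])
--     stack = [[r, c, -1]]
--     while stack:
--         frame = stack[-1]
--         a, b, i = frame
--         if i < 0:
--             path.append((a, b))
--             visit[a][b] = True
--             if len(path) == total:
--                 return True
--         nbrs = mat[a][b]
--         j = i + 1
--         while j < len(nbrs) and visit[nbrs[j][0]][nbrs[j][1]]:
--             j += 1
--         if j < len(nbrs):
--             frame[2] = j
--             stack.append([nbrs[j][0], nbrs[j][1], -1])
--         else:
--             stack.pop()
--             path.pop()
--             visit[a][b] = False
-- ===== Notes on version B (the rewrite author's own statement) =====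
-- stated objective: alternative
-- what changed: Replaces the recursive backtracking DFS with an iterative one driven by an explicit stack of frames, each holding a cell and a cursor into its neighbor list, with entry/backtrack bookkeeping done per stack operation; Pre_ excludes inputs on which A raises IndexError and those whose coordinates are out of range yet happen never to be reached, a reachability property with no closed form.
import Mathlib
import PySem

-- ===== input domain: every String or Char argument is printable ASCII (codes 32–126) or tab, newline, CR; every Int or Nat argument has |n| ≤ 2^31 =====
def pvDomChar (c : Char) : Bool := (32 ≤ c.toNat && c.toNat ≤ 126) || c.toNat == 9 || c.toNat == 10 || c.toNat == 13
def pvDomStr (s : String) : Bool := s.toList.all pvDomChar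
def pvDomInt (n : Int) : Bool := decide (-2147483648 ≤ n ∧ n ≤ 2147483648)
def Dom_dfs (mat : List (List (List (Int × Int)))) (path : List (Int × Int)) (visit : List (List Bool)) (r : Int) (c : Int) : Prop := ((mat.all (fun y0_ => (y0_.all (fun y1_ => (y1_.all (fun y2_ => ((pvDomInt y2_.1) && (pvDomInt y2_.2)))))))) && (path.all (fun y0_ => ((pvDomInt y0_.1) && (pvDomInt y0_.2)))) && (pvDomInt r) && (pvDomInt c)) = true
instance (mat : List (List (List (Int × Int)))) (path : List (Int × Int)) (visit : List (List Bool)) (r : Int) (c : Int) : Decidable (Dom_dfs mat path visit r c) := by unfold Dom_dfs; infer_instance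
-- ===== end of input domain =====

-- B replaces A's recursive backtracking DFS by an iterative one driven by an explicit stack of
-- frames (cell + cursor into its neighbor list).  Both Pythons mutate path/visit identically; the
-- equivalence proved here is about the RETURN value.

-- visit[a][b] (total form; exact for in-range indices, which Pre_dfs guarantees)
def vget (v : List (List Bool)) (a b : Int) : Bool :=
  PySem.List.pyGetD (PySem.List.pyGetD v a []) b false

-- visit[a][b] = x (total form; exact for in-range indices, which Pre_dfs guarantees)
def vset (v : List (List Bool)) (a b : Int) (x : Bool) : List (List Bool) :=
  PySem.List.pySetD v a (PySem.List.pySetD (PySem.List.pyGetD v a []) b x)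

-- mat[a][b] (total form; exact for in-range indices, which Pre_dfs guarantees)
def mget (mat : List (List (List (Int × Int)))) (a b : Int) : List (Int × Int) :=
  PySem.List.pyGetD (PySem.List.pyGetD mat a []) b []

-- ===== PORT A =====
-- State-threading transliteration of A: result plus the (mutated) path and visit.
-- The Nat argument is a fuel guard only (recursion depth; rows*cols+1 always suffices under Pre_dfs).
mutual
def dfsGo : Nat → List (List (List (Int × Int))) → List (Int × Int) → List (List Bool) → Int → Int → Option Bool × List (Int × Int) × List (List Bool)
  | 0, _, path, visit, _, _ => (none, path, visit)
  | Nat.succ f, mat, path, visit, r, c =>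
    let path1 := path ++ [(r, c)]                                -- path.append((r, c))
    let visit1 := vset visit r c true                            -- visit[r][c] = True
    if (path1.length : Int) = (visit1.length : Int) * ((PySem.List.pyGetD visit1 0 []).length : Int) then
      (some true, path1, visit1)                                 -- return True
    else
      match dfsLoop f mat (mget mat r c) path1 visit1 with       -- for i in mat[r][c]: …
      | (some b, p, v) => (some b, p, v)
      | (none, p, v) => (none, p.dropLast, vset v r c false)     -- path.pop(); visit[r][c] = False
termination_by f _ _ _ _ _ => (f, 0)

def dfsLoop : Nat → List (List (List (Int × Int))) → List (Int × Int) → List (Int × Int) → List (List Bool) → Option Bool × List (Int × Int) × List (List Bool)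
  | _, _, [], path, visit => (none, path, visit)
  | f, mat, (a, b) :: rest, path, visit =>
    if !(vget visit a b) then                                    -- if not visit[i[0]][i[1]]:
      match dfsGo f mat path visit a b with
      | (some true, p, v) => (some true, p, v)                   -- if dfs(…): return True
      | (_, p, v) => dfsLoop f mat rest p v
    else dfsLoop f mat rest path visit
termination_by f _ nbrs _ _ => (f, nbrs.length + 1)
end

def dfs (mat : List (List (List (Int × Int)))) (path : List (Int × Int)) (visit : List (List Bool)) (r : Int) (c : Int) : Option Bool :=
  (dfsGo (visit.length * (PySem.List.pyGetD visit 0 []).length + 1) mat path visit r c).1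

-- ===== PORT B =====
-- Source B's inner `while j < len(nbrs) and visit[nbrs[j][0]][nbrs[j][1]]: j += 1`
def advance (visit : List (List Bool)) (nbrs : List (Int × Int)) (j : Nat) : Nat :=
  if h : j < nbrs.length then
    if vget visit (nbrs[j]).1 (nbrs[j]).2 then advance visit nbrs (j + 1) else j
  else j
termination_by nbrs.length - j

-- the push-or-pop tail of one loop iteration of Source B (after the cursor has been advanced)
def contM (mat : List (List (List (Int × Int)))) (a b : Int) (S : List (Int × Int × Int))
    (p : List (Int × Int)) (v : List (List Bool)) (start : Nat) : List (Int × Int × Int) × List (Int × Int) × List (List Bool) :=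
  let nbrs := mget mat a b
  let j := advance v nbrs start
  if h : j < nbrs.length then
    (((nbrs[j]).1, (nbrs[j]).2, -1) :: (a, b, (j : Int)) :: S, p, v)      -- frame[2] = j; stack.append
  else (S, p.dropLast, vset v a b false)                                  -- stack.pop(); path.pop(); visit[a][b] = False

-- one iteration of Source B's while loop: finished result (.inl) or next state (.inr)
def stepM (mat : List (List (List (Int × Int)))) (total : Int) :
    List (Int × Int × Int) × List (Int × Int) × List (List Bool) →
    (Option Bool × List (Int × Int) × List (List Bool)) ⊕ (List (Int × Int × Int) × List (Int × Int) × List (List Bool))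
  | ([], p, v) => .inl (none, p, v)                              -- while stack: … falls through
  | ((a, b, i) :: S, p, v) =>
    if i < 0 then
      let p1 := p ++ [(a, b)]                                    -- path.append((a, b))
      let v1 := vset v a b true                                  -- visit[a][b] = True
      if (p1.length : Int) = total then .inl (some true, p1, v1) -- return True
      else .inr (contM mat a b S p1 v1 (i + 1).toNat)
    else .inr (contM mat a b S p v (i + 1).toNat)

-- the while loop; the Nat argument is a fuel guard only (the fuel chosen in dfs_alt is proved
-- sufficient under Pre_dfs)
def runM : Nat → List (List (List (Int × Int)))  → Int →
    List (Int × Int × Int) × List (Int × Int) × List (List Bool) →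
    Option Bool × List (Int × Int) × List (List Bool)
  | 0, _, _, (_, p, v) => (none, p, v)
  | Nat.succ F, mat, total, s =>
    match stepM mat total s with
    | .inl r => r
    | .inr s' => runM F mat total s'

-- fuel bookkeeping (guard only): an upper bound on the number of loop iterations
def entryCount (visit : List (List Bool)) : Nat := (visit.map List.length).sum
def branchBound (mat : List (List (List (Int × Int)))) : Nat :=
  (mat.flatMap (fun row => row.map List.length)).foldr max 0
def costN (M : Nat) : Nat → Nat
  | 0 => 1
  | n + 1 => M * costN M n + M + 1
def fuelM (mat : List (List (List (Int × Int)))) (visit : List (List Bool)) : Nat :=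
  costN (branchBound mat) (visit.length * (PySem.List.pyGetD visit 0 []).length + 1 + entryCount visit) + 1

def dfs_alt (mat : List (List (List (Int × Int)))) (path : List (Int × Int)) (visit : List (List Bool)) (r : Int) (c : Int) : Option Bool :=
  (runM (fuelM mat visit) mat
    ((visit.length : Int) * ((PySem.List.pyGetD visit 0 []).length : Int))   -- total = len(visit)*len(visit[0])
    ([(r, c, -1)], path, visit)).1                                           -- stack = [[r, c, -1]]

-- ===== PRECONDITION & SPEC =====
-- p is an index pair Python accepts for g[p.1][p.2] (negative wraparound allowed)
def WIn {A : Type} (g : List (List A)) (p : Int × Int) : Prop :=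
  PySem.Raise.InRange g.length p.1 ∧ PySem.Raise.InRange (PySem.List.pyGetD g p.1 []).length p.2

-- Pre_dfs admits the inputs on which A provably returns: (i) immediate success (the length test
-- fires at the start cell), (ii) immediate failure (every neighbor of the start cell is already
-- visited), or (iii) every coordinate pair in mat and the start cell index both grids.  Outside
-- these A either raises IndexError, or it returns only because an out-of-range coordinate sitting
-- somewhere in mat happens never to be reached — a reachability property with no closed form.
def Pre_dfs (mat : List (List (List (Int × Int)))) (path : List (Int × Int)) (visit : List (List Bool)) (r : Int) (c : Int) : Prop :=
  WIn visit (r, c) ∧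
  ((path.length : Int) + 1 = (visit.length : Int) * ((PySem.List.pyGetD visit 0 []).length : Int)
   ∨ (WIn mat (r, c) ∧ ∀ p ∈ mget mat r c, WIn visit p ∧ vget visit p.1 p.2 = true)
   ∨ (WIn mat (r, c) ∧ ∀ mrow ∈ mat, ∀ cell ∈ mrow, ∀ p ∈ cell, WIn visit p ∧ WIn mat p))
instance (mat : List (List (List (Int × Int)))) (path : List (Int × Int)) (visit : List (List Bool)) (r : Int) (c : Int) : Decidable (Pre_dfs mat path visit r c) := by unfold Pre_dfs WIn PySem.Raise.InRange; infer_instance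

def pvWitness_dfs : (List (List (List (Int × Int)))) × (List (Int × Int)) × List (List Bool) × Int × Int :=
  ([[[(0, 0)]]], [], [[false]], 0, 0)

def Spec_dfs (mat : List (List (List (Int × Int)))) (path : List (Int × Int)) (visit : List (List Bool)) (r : Int) (c : Int) (out : Option Bool) : Prop := out = dfs_alt mat path visit r c
instance (mat : List (List (List (Int × Int)))) (path : List (Int × Int)) (visit : List (List Bool)) (r : Int) (c : Int) (out : Option Bool) : Decidable (Spec_dfs mat path visit r c out) := by unfold Spec_dfs; infer_instance

-- ===== CLAIM (what is proved, stated in full; the proofs are below) =====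
def Claim_equal_dfs : Prop := ∀ (mat : List (List (List (Int × Int)))) (path : List (Int × Int)) (visit : List (List Bool)) (r : Int) (c : Int), Dom_dfs mat path visit r c → Pre_dfs mat path visit r c → Spec_dfs mat path visit r c (dfs mat path visit r c)

-- ===== LEMMAS AND PROOFS =====

-- the row-length profile of a grid; vset never changes it
def rowLens (v : List (List Bool)) : List Nat := v.map List.length

-- the well-formedness facts Pre_dfs's third disjunct gives about mat's coordinate pairs
def Ctx (mat : List (List (List (Int × Int)))) (visit0 : List (List Bool)) : Prop :=
  ∀ mrow ∈ mat, ∀ cell ∈ mrow, ∀ p ∈ cell, WIn visit0 p ∧ WIn mat p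

theorem pyIdx_val {n : Nat} {i : Int} {k : Nat} (h : PySem.List.pyIdx? n i = some k) :
    (k : Int) = (if i < 0 then i + n else i) ∧ k < n := by
  unfold PySem.List.pyIdx? at h
  split_ifs at h <;> simp_all <;> omega

theorem pyIdx_some_lt {n : Nat} {i : Int} {k : Nat} (h : PySem.List.pyIdx? n i = some k) : k < n :=
  (pyIdx_val h).2

theorem pyIdx_of_inRange {n : Nat} {i : Int} (h : PySem.Raise.InRange n i) :
    ∃ k, PySem.List.pyIdx? n i = some k := by
  unfold PySem.Raise.InRange at h
  unfold PySem.List.pyIdx?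
  split_ifs <;> [exact ⟨_, rfl⟩; omega; exact ⟨_, rfl⟩; omega]

theorem pyGetD_idx {A : Type} (xs : List A) (i : Int) (d : A) {k : Nat}
    (h : PySem.List.pyIdx? xs.length i = some k) :
    PySem.List.pyGetD xs i d = xs[k]'(pyIdx_some_lt h) := by
  simp [PySem.List.pyGetD, PySem.List.pyGet?, h, List.getElem?_eq_getElem (pyIdx_some_lt h)]

theorem pyGetD_nidx {A : Type} (xs : List A) (i : Int) (d : A)
    (h : PySem.List.pyIdx? xs.length i = none) : PySem.List.pyGetD xs i d = d := by
  simp [PySem.List.pyGetD, PySem.List.pyGet?, h]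

theorem pySetD_idx {A : Type} (xs : List A) (i : Int) (v : A) {k : Nat}
    (h : PySem.List.pyIdx? xs.length i = some k) : PySem.List.pySetD xs i v = xs.set k v := by
  simp [PySem.List.pySetD, PySem.List.pySet?, h]

theorem pySetD_nidx {A : Type} (xs : List A) (i : Int) (v : A)
    (h : PySem.List.pyIdx? xs.length i = none) : PySem.List.pySetD xs i v = xs := by
  simp [PySem.List.pySetD, PySem.List.pySet?, h]

theorem getD_eq_g {A : Type} (l : List A) (n : Nat) (d : A) (h : n < l.length) :
    l.getD n d = l[n] := by
  simp [List.getD_eq_getElem?_getD, List.getElem?_eq_getElem h]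

theorem length_vset (v : List (List Bool)) (a b : Int) (x : Bool) :
    (vset v a b x).length = v.length := by
  simp [vset, PySem.List.length_pySetD]

theorem rowLens_vset (v : List (List Bool)) (a b : Int) (x : Bool) :
    rowLens (vset v a b x) = rowLens v := by
  cases h : PySem.List.pyIdx? v.length a with
  | none => rw [vset, pySetD_nidx _ _ _ h]
  | some k =>
    have hk := pyIdx_some_lt h
    have hv : vset v a b x = v.set k (PySem.List.pySetD (v[k]'hk) b x) := by
      rw [vset, pyGetD_idx _ _ _ h, pySetD_idx _ _ _ h]
    rw [hv, rowLens, List.map_set, PySem.List.length_pySetD]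
    have : (v.map List.length)[k]'(by simpa using hk) = (v[k]'hk).length := by
      simp
    rw [← this, List.set_getElem_self]
    rfl

theorem length_of_rowLens {v v' : List (List Bool)} (h : rowLens v = rowLens v') :
    v.length = v'.length := by
  have := congrArg List.length h
  simpa [rowLens] using this

theorem rowlen_congr {v v' : List (List Bool)} (h : rowLens v = rowLens v') (i : Int) :
    (PySem.List.pyGetD v i []).length = (PySem.List.pyGetD v' i []).length := by
  have hlen : v.length = v'.length := length_of_rowLens h
  cases hx : PySem.List.pyIdx? v.length i with
  | none =>
    rw [pyGetD_nidx _ _ _ hx, pyGetD_nidx _ _ _ (by rw [← hlen]; exact hx)]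
  | some k =>
    have hk := pyIdx_some_lt hx
    have hk' : k < v'.length := by omega
    rw [pyGetD_idx _ _ _ hx, pyGetD_idx _ _ _ (show PySem.List.pyIdx? v'.length i = some k by rw [← hlen]; exact hx)]
    have h1 : (rowLens v).getD k 0 = (v[k]'hk).length := by
      rw [rowLens, getD_eq_g _ _ _ (by simpa using hk)]
      simp
    have h2 : (rowLens v').getD k 0 = (v'[k]'hk').length := by
      rw [rowLens, getD_eq_g _ _ _ (by simpa using hk')]
      simp
    rw [← h1, ← h2, h]

theorem WIn_congr {v v' : List (List Bool)} (h : rowLens v = rowLens v') {p : Int × Int}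
    (hp : WIn v p) : WIn v' p := by
  obtain ⟨h1, h2⟩ := hp
  exact ⟨by rw [← length_of_rowLens h]; exact h1, by rw [← rowlen_congr h]; exact h2⟩

theorem totalOf_congr {v v' : List (List Bool)} (h : rowLens v = rowLens v') :
    (v.length : Int) * ((PySem.List.pyGetD v 0 []).length : Int)
      = (v'.length : Int) * ((PySem.List.pyGetD v' 0 []).length : Int) := by
  rw [length_of_rowLens h, rowlen_congr h]

theorem win_unpack {v : List (List Bool)} {a b : Int} (h : WIn v (a, b)) :
    ∃ i j, PySem.List.pyIdx? v.length a = some i ∧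
      PySem.List.pyIdx? (PySem.List.pyGetD v a []).length b = some j := by
  obtain ⟨h1, h2⟩ := h
  obtain ⟨i, hi⟩ := pyIdx_of_inRange h1
  obtain ⟨j, hj⟩ := pyIdx_of_inRange h2
  exact ⟨i, j, hi, hj⟩

theorem vget_nf {v : List (List Bool)} {a b : Int} {i j : Nat}
    (hi : PySem.List.pyIdx? v.length a = some i)
    (hj : PySem.List.pyIdx? (PySem.List.pyGetD v a []).length b = some j) :
    vget v a b = (v.getD i []).getD j false := by
  have hi' := pyIdx_some_lt hi
  have hgr : PySem.List.pyGetD v a [] = v.getD i [] := by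
    rw [pyGetD_idx _ _ _ hi, getD_eq_g _ _ _ hi']
  rw [hgr] at hj
  have hj' := pyIdx_some_lt hj
  rw [vget, hgr, pyGetD_idx _ _ _ hj, getD_eq_g _ _ _ hj']

theorem vset_nf {v : List (List Bool)} {a b : Int} {i j : Nat} (x : Bool)
    (hi : PySem.List.pyIdx? v.length a = some i)
    (hj : PySem.List.pyIdx? (PySem.List.pyGetD v a []).length b = some j) :
    vset v a b x = v.set i ((v.getD i []).set j x) := by
  have hi' := pyIdx_some_lt hi
  have hgr : PySem.List.pyGetD v a [] = v.getD i [] := by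
    rw [pyGetD_idx _ _ _ hi, getD_eq_g _ _ _ hi']
  rw [hgr] at hj
  rw [vset, pySetD_idx _ _ _ hi, hgr, pySetD_idx _ _ _ hj]

theorem vset_vset_w {v : List (List Bool)} {a b : Int} (x y : Bool) (h : WIn v (a, b)) :
    vset (vset v a b x) a b y = vset v a b y := by
  obtain ⟨i, j, hi, hj⟩ := win_unpack h
  have hi' := pyIdx_some_lt hi
  have hgi : PySem.List.pyGetD v a [] = v.getD i [] := by
    rw [pyGetD_idx _ _ _ hi]
    exact (getD_eq_g _ _ _ hi').symm
  have hj2 : PySem.List.pyIdx? (v.getD i []).length b = some j := by rw [← hgi]; exact hj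
  have hset : vset v a b x = v.set i ((v.getD i []).set j x) := vset_nf x hi hj
  have hi3 : PySem.List.pyIdx? (vset v a b x).length a = some i := by
    rw [length_vset]; exact hi
  have hrow3 : PySem.List.pyGetD (vset v a b x) a [] = (v.getD i []).set j x := by
    rw [hset, pyGetD_idx _ _ _ (show PySem.List.pyIdx? (v.set i ((v.getD i []).set j x)).length a = some i by rw [List.length_set]; exact hi)]
    exact List.getElem_set_self _
  have hj3 : PySem.List.pyIdx? (PySem.List.pyGetD (vset v a b x) a []).length b = some j := by
    rw [hrow3, List.length_set]
    exact hj2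
  have hpg : PySem.List.pyGetD (vset v a b x) a [] = (vset v a b x).getD i [] := by
    rw [pyGetD_idx (vset v a b x) a ([] : List Bool) hi3]
    exact (getD_eq_g _ _ _ (by rw [length_vset]; exact hi')).symm
  have hrowD : (vset v a b x).getD i [] = (v.getD i []).set j x := hpg.symm.trans hrow3
  rw [vset_nf y hi3 hj3, hrowD, hset, vset_nf y hi hj, List.set_set, List.set_set]

theorem vset_noop_w {v : List (List Bool)} {a b : Int} {x : Bool} (h : WIn v (a, b))
    (hv : vget v a b = x) : vset v a b x = v := by
  obtain ⟨i, j, hi, hj⟩ := win_unpack h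
  rw [vget_nf hi hj] at hv
  have hi' := pyIdx_some_lt hi
  have hgi : PySem.List.pyGetD v a [] = v.getD i [] := by
    rw [pyGetD_idx _ _ _ hi, getD_eq_g _ _ _ hi']
  have hj' : j < (v.getD i []).length := by
    have := pyIdx_some_lt hj
    rw [hgi] at this
    exact this
  rw [vset_nf x hi hj, ← hv, getD_eq_g _ _ _ hj', List.set_getElem_self,
    getD_eq_g _ _ _ hi', List.set_getElem_self]

theorem vget_vset_true_mono (v : List (List Bool)) (a b p q : Int)
    (h : vget v p q = true) : vget (vset v a b true) p q = true := by
  cases ha : PySem.List.pyIdx? v.length a with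
  | none => rwa [vset, pySetD_nidx _ _ _ ha]
  | some k =>
    have hk := pyIdx_some_lt ha
    have hv : vset v a b true = v.set k (PySem.List.pySetD (v[k]'hk) b true) := by
      rw [vset, pyGetD_idx _ _ _ ha, pySetD_idx _ _ _ ha]
    cases hb : PySem.List.pyIdx? (v[k]'hk).length b with
    | none =>
      rw [hv, pySetD_nidx _ _ _ hb, List.set_getElem_self]
      exact h
    | some m =>
      have hm := pyIdx_some_lt hb
      cases hp : PySem.List.pyIdx? v.length p with
      | none =>
        rw [vget, pyGetD_nidx _ _ _ hp] at h
        simp [PySem.List.pyGetD, PySem.List.pyGet?] at h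
      | some j =>
        have hj := pyIdx_some_lt hp
        have hp' : PySem.List.pyIdx? (v.set k (PySem.List.pySetD (v[k]'hk) b true)).length p = some j := by
          rw [List.length_set]; exact hp
        rw [vget, pyGetD_idx _ _ _ hp] at h
        rw [hv, vget, pyGetD_idx _ _ _ hp']
        by_cases hjk : k = j
        · subst hjk
          rw [List.getElem_set_self]
          rw [pySetD_idx _ _ _ hb]
          cases hq : PySem.List.pyIdx? (v[k]'hk).length q with
          | none =>
            rw [pyGetD_nidx _ _ _ hq] at h
            exact absurd h (by simp)
          | some t =>
            have ht := pyIdx_some_lt hq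
            have hq' : PySem.List.pyIdx? ((v[k]'hk).set m true).length q = some t := by
              rw [List.length_set]; exact hq
            rw [pyGetD_idx _ _ _ hq'] at *
            rw [pyGetD_idx _ _ _ hq] at h
            by_cases hmt : m = t
            · subst hmt; rw [List.getElem_set_self]
            · rw [List.getElem_set_ne hmt]; exact h
        · rw [List.getElem_set_ne hjk]
          exact h

theorem mget_ctx {mat : List (List (List (Int × Int)))} {visit0 : List (List Bool)}
    {r c : Int} (hctx : Ctx mat visit0) (hm : WIn mat (r, c)) :
    ∀ p ∈ mget mat r c, WIn visit0 p ∧ WIn mat p := by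
  obtain ⟨h1, h2⟩ := hm
  intro p hp
  have hrowmem : PySem.List.pyGetD mat r [] ∈ mat := PySem.List.pyGetD_mem mat _ h1
  have hcellmem : PySem.List.pyGetD (PySem.List.pyGetD mat r []) c [] ∈ PySem.List.pyGetD mat r [] :=
    PySem.List.pyGetD_mem _ _ h2
  exact hctx _ hrowmem _ hcellmem p (by rw [mget] at hp; exact hp)

-- A's neighbor loop skips every already-visited neighbor and falls through
theorem dfsLoop_skip (f : Nat) (mat : List (List (List (Int × Int)))) (nbrs : List (Int × Int))
    (path : List (Int × Int)) (visit : List (List Bool))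
    (h : ∀ p ∈ nbrs, vget visit p.1 p.2 = true) :
    dfsLoop f mat nbrs path visit = (none, path, visit) := by
  induction nbrs with
  | nil => simp [dfsLoop]
  | cons pr rest ih =>
    obtain ⟨a, b⟩ := pr
    have ha : vget visit a b = true := h (a, b) (by simp)
    simp only [dfsLoop]
    rw [ha]
    simp only [Bool.not_true, Bool.false_eq_true, if_false]
    exact ih (fun p hp => h p (by simp [hp]))


-- ---- counting and fuel lemmas ----

def falseCount (v : List (List Bool)) : Nat := (v.map (fun row => row.count false)).sum

theorem count_false_set_true : ∀ (row : List Bool) (j : Nat), j < row.length → row[j]! = false →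
    (row.set j true).count false + 1 = row.count false := by
  intro row
  induction row with
  | nil => intro j h; simp at h
  | cons x xs ih =>
    intro j hj hx
    cases j with
    | zero => simp_all [List.count_cons]
    | succ j =>
      have hj' : j < xs.length := by simpa using hj
      have hx' : xs[j]! = false := by simpa using hx
      have := ih j hj' hx'
      simp only [List.set_cons_succ, List.count_cons]
      omega

theorem sum_set_nat : ∀ (l : List Nat) (i : Nat), i < l.length → ∀ x,
    (l.set i x).sum + l[i]! = l.sum + x := by
  intro l
  induction l with
  | nil => intro i h; simp at h
  | cons y ys ih =>
    intro i hi x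
    cases i with
    | zero => simp [List.sum_cons]; omega
    | succ i =>
      have hi' : i < ys.length := by simpa using hi
      have := ih i hi' x
      simp only [List.set_cons_succ, List.sum_cons, List.getElem!_cons_succ]
      omega

theorem falseCount_vset_true {v : List (List Bool)} {a b : Int} (h : WIn v (a, b))
    (hg : vget v a b = false) : falseCount (vset v a b true) + 1 = falseCount v := by
  obtain ⟨i, j, hi, hj⟩ := win_unpack h
  have hi' := pyIdx_some_lt hi
  have hgr : PySem.List.pyGetD v a [] = v.getD i [] := by
    rw [pyGetD_idx _ _ _ hi, getD_eq_g _ _ _ hi']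
  have hj' : j < (v.getD i []).length := by
    have := pyIdx_some_lt hj; rw [hgr] at this; exact this
  have hrow : v.getD i [] = v[i]'hi' := getD_eq_g _ _ _ hi'
  have hgv : (v[i]'hi')[j]! = false := by
    rw [vget_nf hi hj, hrow] at hg
    rw [← hg, getD_eq_g _ _ _ (by rw [← hrow]; exact hj'), List.getElem!_eq_getElem?_getD,
      List.getElem?_eq_getElem (by rw [← hrow]; exact hj')]
    rfl
  have hset : vset v a b true = v.set i ((v[i]'hi').set j true) := by
    rw [vset_nf true hi hj, hrow]
  rw [hset, falseCount, List.map_set]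
  have hcnt := count_false_set_true (v[i]'hi') j (by rw [← hrow]; exact hj') hgv
  have hsum := sum_set_nat (v.map (fun row => row.count false)) i (by simpa using hi')
    (((v[i]'hi').set j true).count false)
  have hgi : (v.map (fun row => row.count false))[i]! = (v[i]'hi').count false := by
    rw [List.getElem!_eq_getElem?_getD, List.getElem?_eq_getElem (by simpa using hi')]
    simp
  rw [hgi] at hsum
  unfold falseCount
  omega

theorem falseCount_pos {v : List (List Bool)} {a b : Int} (h : WIn v (a, b))
    (hg : vget v a b = false) : 1 ≤ falseCount v := by
  obtain ⟨i, j, hi, hj⟩ := win_unpack h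
  have hi' := pyIdx_some_lt hi
  have hgr : PySem.List.pyGetD v a [] = v.getD i [] := by
    rw [pyGetD_idx _ _ _ hi, getD_eq_g _ _ _ hi']
  have hj' : j < (v.getD i []).length := by
    have := pyIdx_some_lt hj; rw [hgr] at this; exact this
  have hrow : v.getD i [] = v[i]'hi' := getD_eq_g _ _ _ hi'
  have hjv : j < (v[i]'hi').length := by rw [← hrow]; exact hj'
  have hmem : (false : Bool) ∈ v[i]'hi' := by
    rw [vget_nf hi hj, hrow, getD_eq_g _ _ _ hjv] at hg
    exact hg ▸ List.getElem_mem hjv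
  have h1 : 1 ≤ (v[i]'hi').count false := List.count_pos_iff.mpr hmem
  have h2 : (v[i]'hi').count false ≤ falseCount v := by
    unfold falseCount
    exact List.single_le_sum (fun x _ => Nat.zero_le x) _
      (List.mem_map_of_mem (List.getElem_mem hi'))
  omega

theorem sum_count_le : ∀ (v : List (List Bool)),
    (v.map (fun row => row.count false)).sum ≤ (v.map List.length).sum := by
  intro v
  induction v with
  | nil => simp
  | cons row rest ih =>
    simp only [List.map_cons, List.sum_cons]
    exact Nat.add_le_add (List.count_le_length) ih

theorem falseCount_le_entryCount {v w : List (List Bool)} (h : rowLens v = rowLens w) :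
    falseCount v ≤ entryCount w := by
  have h1 : falseCount v ≤ entryCount v := sum_count_le v
  have h2 : entryCount v = entryCount w := by
    unfold entryCount
    have : v.map List.length = w.map List.length := h
    rw [this]
  omega

theorem costN_pos (M n : Nat) : 1 ≤ costN M n := by
  cases n with
  | zero => simp [costN]
  | succ n => simp only [costN]; omega

theorem le_foldr_max : ∀ (l : List Nat) (x : Nat), x ∈ l → x ≤ l.foldr max 0 := by
  intro l
  induction l with
  | nil => intro x h; simp at h
  | cons y ys ih =>
    intro x h
    rcases List.mem_cons.mp h with h | h
    · subst h; exact le_max_left _ _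
    · exact le_trans (ih x h) (le_max_right _ _)

theorem mget_len_le {mat : List (List (List (Int × Int)))} {r c : Int} (h : WIn mat (r, c)) :
    (mget mat r c).length ≤ branchBound mat := by
  obtain ⟨h1, h2⟩ := h
  have hrow : PySem.List.pyGetD mat r [] ∈ mat := PySem.List.pyGetD_mem mat _ h1
  have hcell : PySem.List.pyGetD (PySem.List.pyGetD mat r []) c [] ∈ PySem.List.pyGetD mat r [] :=
    PySem.List.pyGetD_mem _ _ h2
  apply le_foldr_max
  rw [List.mem_flatMap]
  exact ⟨PySem.List.pyGetD mat r [], hrow, List.mem_map_of_mem hcell⟩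

-- ---- the machine's step-count semantics ----

def stepN (mat : List (List (List (Int × Int)))) (total : Int) :
    Nat → List (Int × Int × Int) × List (Int × Int) × List (List Bool) →
    (Option Bool × List (Int × Int) × List (List Bool)) ⊕ (List (Int × Int × Int) × List (Int × Int) × List (List Bool))
  | 0, s => .inr s
  | k + 1, s =>
    match stepM mat total s with
    | .inl r => .inl r
    | .inr s' => stepN mat total k s'

theorem stepN_add (mat : List (List (List (Int × Int)))) (total : Int) :
    ∀ (k1 k2 : Nat) (s : List (Int × Int × Int) × List (Int × Int) × List (List Bool)),
    stepN mat total (k1 + k2) s =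
      match stepN mat total k1 s with
      | .inl r => .inl r
      | .inr s' => stepN mat total k2 s' := by
  intro k1
  induction k1 with
  | zero => intro k2 s; simp [stepN]
  | succ k ih =>
    intro k2 s
    rw [show k + 1 + k2 = (k + k2) + 1 by omega]
    simp only [stepN]
    cases stepM mat total s with
    | inl r => rfl
    | inr s' => exact ih k2 s'

theorem runM_of_stepN (mat : List (List (List (Int × Int)))) (total : Int) :
    ∀ (k : Nat) (s : List (Int × Int × Int) × List (Int × Int) × List (List Bool)) (r : Option Bool × List (Int × Int) × List (List Bool)),
    stepN mat total k s = .inl r → ∀ F, k ≤ F → runM F mat total s = r := by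
  intro k
  induction k with
  | zero => intro s r h; simp [stepN] at h
  | succ k ih =>
    intro s r h F hF
    simp only [stepN] at h
    obtain ⟨F', rfl⟩ : ∃ F', F = F' + 1 := ⟨F - 1, by omega⟩
    simp only [runM]
    cases hs : stepM mat total s with
    | inl r' =>
      rw [hs] at h
      simp only [Sum.inl.injEq] at h
      simp only [hs]
      exact h
    | inr s' =>
      rw [hs] at h
      exact ih s' r h F' (by omega)

-- ---- advance lemmas ----

theorem advance_ge (v : List (List Bool)) (nbrs : List (Int × Int)) :
    ∀ (d t : Nat), nbrs.length - t ≤ d → t ≤ advance v nbrs t := by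
  intro d
  induction d with
  | zero =>
    intro t h
    rw [advance.eq_def]
    have : ¬ t < nbrs.length := by omega
    simp [this]
  | succ d ih =>
    intro t h
    rw [advance.eq_def]
    split_ifs with h1 h2
    · exact le_trans (by omega) (ih (t + 1) (by omega))
    · exact le_refl t
    · exact le_refl t

theorem getBang_eq {A : Type} [Inhabited A] {l : List A} {i : Nat} (h : i < l.length) :
    l[i]! = l[i] := by
  simp [List.getElem!_eq_getElem?_getD, List.getElem?_eq_getElem h]

theorem advance_false (v : List (List Bool)) (nbrs : List (Int × Int)) :
    ∀ (d t : Nat), nbrs.length - t ≤ d →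
    advance v nbrs t < nbrs.length →
    vget v (nbrs[advance v nbrs t]!).1 (nbrs[advance v nbrs t]!).2 = false := by
  intro d
  induction d with
  | zero =>
    intro t hd h
    rw [advance.eq_def] at h
    have hnot : ¬ t < nbrs.length := by omega
    simp [hnot] at h
  | succ d ih =>
    intro t hd h
    have he : advance v nbrs t = if h1 : t < nbrs.length then
        (if vget v (nbrs[t]).1 (nbrs[t]).2 then advance v nbrs (t + 1) else t) else t := by
      rw [advance.eq_def]
    by_cases h1 : t < nbrs.length
    · by_cases h2 : vget v (nbrs[t]).1 (nbrs[t]).2 = true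
      · have he2 : advance v nbrs t = advance v nbrs (t + 1) := by rw [he]; simp [h1, h2]
        rw [he2] at h ⊢
        exact ih (t + 1) (by omega) h
      · have he2 : advance v nbrs t = t := by
          rw [he]; simp only [h1, dif_pos]; rw [if_neg h2]
        rw [he2, getBang_eq h1]
        simpa using h2
    · have he2 : advance v nbrs t = t := by rw [he]; simp [h1]
      rw [he2] at h
      omega

theorem advance_drop (f : Nat) (mat : List (List (List (Int × Int)))) (v : List (List Bool))
    (nbrs : List (Int × Int)) (p : List (Int × Int)) :
    ∀ (d t : Nat), nbrs.length - t ≤ d →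
    dfsLoop f mat (nbrs.drop t) p v = dfsLoop f mat (nbrs.drop (advance v nbrs t)) p v := by
  intro d
  induction d with
  | zero =>
    intro t h
    rw [advance.eq_def]
    have : ¬ t < nbrs.length := by omega
    simp [this]
  | succ d ih =>
    intro t h
    rw [advance.eq_def]
    split_ifs with h1 h2
    · rw [← ih (t + 1) (by omega), ← List.getElem_cons_drop h1]
      rcases hab : nbrs[t] with ⟨a, b⟩
      rw [hab] at h2
      simp only [dfsLoop, h2, Bool.not_true, Bool.false_eq_true, if_false]
    · rfl
    · rfl

theorem advance_all (v : List (List Bool)) (nbrs : List (Int × Int))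
    (hall : ∀ (i : Nat) (h : i < nbrs.length), vget v (nbrs[i]).1 (nbrs[i]).2 = true) :
    ∀ (d t : Nat), nbrs.length - t ≤ d → t ≤ nbrs.length → advance v nbrs t = nbrs.length := by
  intro d
  induction d with
  | zero =>
    intro t h ht
    rw [advance.eq_def]
    have : ¬ t < nbrs.length := by omega
    simp [this]; omega
  | succ d ih =>
    intro t h ht
    rw [advance.eq_def]
    split_ifs with h1 h2
    · exact ih (t + 1) (by omega) (by omega)
    · rw [hall t h1] at h2; simp at h2
    · omega


-- ---- invariants of A's port: a failing call restores path, `some` results are `some true`,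
-- and the grid's row-length profile never changes ----

def AFacts (p : List (Int × Int)) (v : List (List Bool))
    (R : Option Bool × List (Int × Int) × List (List Bool)) : Prop :=
  (R.1 = none → R.2.1 = p) ∧ (∀ b, R.1 = some b → b = true) ∧ rowLens R.2.2 = rowLens v

theorem A_facts_loop (f : Nat) (mat : List (List (List (Int × Int))))
    (hgo : ∀ p v r c, AFacts p v (dfsGo f mat p v r c)) :
    ∀ (nbrs : List (Int × Int)) (p : List (Int × Int)) (v : List (List Bool)),
    AFacts p v (dfsLoop f mat nbrs p v) := by
  intro nbrs
  induction nbrs with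
  | nil =>
    intro p v
    refine ⟨?_, ?_, ?_⟩ <;> simp [dfsLoop]
  | cons pr rest ih =>
    intro p v
    obtain ⟨a, b⟩ := pr
    by_cases hg : vget v a b = true
    · have heq : dfsLoop f mat ((a, b) :: rest) p v = dfsLoop f mat rest p v := by
        simp [dfsLoop, hg]
      rw [heq]
      exact ih p v
    · have hg2 : vget v a b = false := by simpa using hg
      obtain ⟨hpath, hsome, hrl⟩ := hgo p v a b
      rcases hr : dfsGo f mat p v a b with ⟨res, p', v'⟩
      rw [hr] at hpath hsome hrl
      simp only at hpath hsome hrl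
      cases res with
      | some bb =>
        have hbb : bb = true := hsome bb rfl
        subst hbb
        have heq : dfsLoop f mat ((a, b) :: rest) p v = (some true, p', v') := by
          simp [dfsLoop, hg2, hr]
        rw [heq]
        refine ⟨by simp, ?_, hrl⟩
        intro b hb
        simpa using hb.symm
      | none =>
        have hp' : p' = p := hpath rfl
        have heq : dfsLoop f mat ((a, b) :: rest) p v = dfsLoop f mat rest p' v' := by
          simp [dfsLoop, hg2, hr]
        rw [heq, hp']
        obtain ⟨h1, h2, h3⟩ := ih p v'
        exact ⟨h1, h2, h3.trans hrl⟩

theorem A_facts : ∀ (f : Nat) (mat : List (List (List (Int × Int))))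
    (p : List (Int × Int)) (v : List (List Bool)) (r c : Int),
    AFacts p v (dfsGo f mat p v r c) := by
  intro f
  induction f with
  | zero =>
    intro mat p v r c
    refine ⟨?_, ?_, ?_⟩ <;> simp [dfsGo]
  | succ f ih =>
    intro mat p v r c
    by_cases ht : ((p ++ [(r, c)]).length : Int)
        = ((vset v r c true).length : Int) * ((PySem.List.pyGetD (vset v r c true) 0 []).length : Int)
    · have heq : dfsGo (f + 1) mat p v r c = (some true, p ++ [(r, c)], vset v r c true) := by
        simp only [dfsGo]
        rw [if_pos ht]
      rw [heq]
      refine ⟨by simp, ?_, rowLens_vset v r c true⟩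
      intro b hb
      simpa using hb.symm
    · obtain ⟨hpath, hsome, hrl⟩ := A_facts_loop f mat (ih mat) (mget mat r c)
        (p ++ [(r, c)]) (vset v r c true)
      rcases hl : dfsLoop f mat (mget mat r c) (p ++ [(r, c)]) (vset v r c true) with ⟨res, p', v'⟩
      rw [hl] at hpath hsome hrl
      simp only at hpath hsome hrl
      cases res with
      | some bb =>
        have heq : dfsGo (f + 1) mat p v r c = (some bb, p', v') := by
          simp only [dfsGo]
          rw [if_neg ht, hl]
        rw [heq]
        exact ⟨by simp, fun b hb => hsome b (by simpa using hb),
          hrl.trans (rowLens_vset v r c true)⟩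
      | none =>
        have heq : dfsGo (f + 1) mat p v r c = (none, p'.dropLast, vset v' r c false) := by
          simp only [dfsGo]
          rw [if_neg ht, hl]
        rw [heq]
        refine ⟨fun _ => ?_, by simp, ?_⟩
        · rw [hpath rfl]
          exact List.dropLast_concat
        · rw [rowLens_vset, hrl, rowLens_vset]


-- ---- the machine explores a doomed subtree (total already unreachable) and restores its state ----

theorem int_toNat_succ (j : Nat) : (((j : Int)) + 1).toNat = j + 1 := by omega

theorem stepM_enter (mat : List (List (List (Int × Int)))) (total : Int)
    (r c : Int) (S : List (Int × Int × Int)) (p : List (Int × Int)) (v : List (List Bool))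
    (ht : ¬ (((p ++ [(r, c)]).length : Int) = total)) :
    stepM mat total ((r, c, -1) :: S, p, v)
      = .inr (contM mat r c S (p ++ [(r, c)]) (vset v r c true) 0) := by
  simp only [stepM]
  rw [if_pos (by norm_num : (-1 : Int) < 0), if_neg ht]
  norm_num

theorem stepM_resume (mat : List (List (List (Int × Int)))) (total : Int)
    (r c : Int) (j : Nat) (S : List (Int × Int × Int)) (p : List (Int × Int)) (v : List (List Bool)) :
    stepM mat total ((r, c, (j : Int)) :: S, p, v)
      = .inr (contM mat r c S p v (j + 1)) := by
  simp only [stepM]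
  rw [if_neg (by omega : ¬ ((j : Int) < 0)), int_toNat_succ]

theorem contM_push {mat : List (List (List (Int × Int)))} {r c : Int} {S : List (Int × Int × Int)}
    {p : List (Int × Int)} {v : List (List Bool)} {t : Nat}
    (hj : advance v (mget mat r c) t < (mget mat r c).length) :
    contM mat r c S p v t
      = ((((mget mat r c)[advance v (mget mat r c) t]'hj).1,
          ((mget mat r c)[advance v (mget mat r c) t]'hj).2, -1)
          :: (r, c, ((advance v (mget mat r c) t : Nat) : Int)) :: S, p, v) := by
  simp only [contM]
  rw [dif_pos hj]

theorem contM_pop {mat : List (List (List (Int × Int)))} {r c : Int} {S : List (Int × Int × Int)}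
    {p : List (Int × Int)} {v : List (List Bool)} {t : Nat}
    (hj : ¬ advance v (mget mat r c) t < (mget mat r c).length) :
    contM mat r c S p v t = (S, p.dropLast, vset v r c false) := by
  simp only [contM]
  rw [dif_neg hj]

theorem stepN_chain {mat : List (List (List (Int × Int)))} {total : Int} {k1 k2 : Nat}
    {s s' : List (Int × Int × Int) × List (Int × Int) × List (List Bool)}
    {r : (Option Bool × List (Int × Int) × List (List Bool)) ⊕ (List (Int × Int × Int) × List (Int × Int) × List (List Bool))}
    (h1 : stepN mat total k1 s = .inr s') (h2 : stepN mat total k2 s' = r) :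
    stepN mat total (k1 + k2) s = r := by
  rw [stepN_add, h1]
  exact h2

theorem stepN_one {mat : List (List (List (Int × Int)))} {total : Int}
    {s : List (Int × Int × Int) × List (Int × Int) × List (List Bool)}
    {s' : List (Int × Int × Int) × List (Int × Int) × List (List Bool)}
    (h : stepM mat total s = .inr s') : stepN mat total 1 s = .inr s' := by
  simp only [stepN]
  rw [h]

theorem MF : ∀ (n : Nat) (mat : List (List (List (Int × Int)))) (visit : List (List Bool)) (total : Int)
    (v : List (List Bool)) (r c : Int) (S : List (Int × Int × Int)) (p : List (Int × Int)),
    Ctx mat visit → rowLens v = rowLens visit →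
    WIn visit (r, c) → WIn mat (r, c) → vget v r c = false →
    falseCount v ≤ n → total ≤ (p.length : Int) →
    ∃ k ≤ costN (branchBound mat) n,
      stepN mat total k ((r, c, -1) :: S, p, v) = .inr (S, p, v) := by
  intro n
  induction n with
  | zero =>
    intro mat visit total v r c S p hctx hrl hwv hwm hg hfc hp
    have hwvv : WIn v (r, c) := WIn_congr hrl.symm hwv
    have := falseCount_pos hwvv hg
    omega
  | succ n ihn =>
    intro mat visit total v r c S p hctx hrl hwv hwm hg hfc hp
    have hwvv : WIn v (r, c) := WIn_congr hrl.symm hwv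
    set v1 := vset v r c true with hv1
    set p1 := p ++ [(r, c)] with hp1
    set nbrs := mget mat r c with hnbrs
    set M := branchBound mat with hM
    have hlen : nbrs.length ≤ M := mget_len_le hwm
    have hrl1 : rowLens v1 = rowLens visit := (rowLens_vset v r c true).trans hrl
    have hfc1 : falseCount v1 + 1 = falseCount v := falseCount_vset_true hwvv hg
    have hnb : ∀ q ∈ nbrs, WIn visit q ∧ WIn mat q := mget_ctx hctx hwm
    have hp1len : (p1.length : Int) = (p.length : Int) + 1 := by
      rw [hp1]
      push_cast [List.length_append]
      simp
    have htest : ¬ ((p1.length : Int) = total) := by omega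
    have hrestore : (S, p1.dropLast, vset v1 r c false) = (S, p, v) := by
      rw [hp1, List.dropLast_concat, hv1, vset_vset_w true false hwvv, vset_noop_w hwvv hg]
    have hloop : ∀ d t, nbrs.length - t ≤ d →
        ∃ k ≤ (nbrs.length - t) * (costN M n + 1),
        stepN mat total k (contM mat r c S p1 v1 t) = .inr (S, p, v) := by
      intro d
      induction d with
      | zero =>
        intro t hd
        have hj : ¬ advance v1 nbrs t < nbrs.length := by
          have := advance_ge v1 nbrs 0 t (by omega)
          omega
        refine ⟨0, by omega, ?_⟩
        rw [contM_pop hj, hrestore]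
        rfl
      | succ d ihd =>
        intro t hd
        by_cases hj : advance v1 nbrs t < nbrs.length
        · set j := advance v1 nbrs t with hjdef
          have htj : t ≤ j := advance_ge v1 nbrs nbrs.length t (by omega)
          have hmem : nbrs[j]'hj ∈ nbrs := List.getElem_mem hj
          have hgf : vget v1 (nbrs[j]'hj).1 (nbrs[j]'hj).2 = false := by
            have := advance_false v1 nbrs nbrs.length t (by omega) hj
            rwa [getBang_eq hj] at this
          obtain ⟨hwq, hwqm⟩ := hnb _ hmem
          have hwq' : WIn visit ((nbrs[j]'hj).1, (nbrs[j]'hj).2) := by simpa using hwq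
          have hwqm' : WIn mat ((nbrs[j]'hj).1, (nbrs[j]'hj).2) := by simpa using hwqm
          obtain ⟨k1, hk1, hrun1⟩ := ihn mat visit total v1 (nbrs[j]'hj).1 (nbrs[j]'hj).2
            ((r, c, (j : Int)) :: S) p1 hctx hrl1 hwq' hwqm' hgf (by omega) (by omega)
          rw [← hM] at hk1
          obtain ⟨k2, hk2, hrun2⟩ := ihd (j + 1) (by omega)
          refine ⟨k1 + (1 + k2), ?_, ?_⟩
          · calc k1 + (1 + k2)
                ≤ (costN M n + 1) + (nbrs.length - (j + 1)) * (costN M n + 1) := by omega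
              _ = (1 + (nbrs.length - (j + 1))) * (costN M n + 1) := by
                  rw [Nat.add_mul, one_mul]
              _ ≤ (nbrs.length - t) * (costN M n + 1) :=
                  Nat.mul_le_mul_right _ (by omega)
          · rw [contM_push hj]
            refine stepN_chain hrun1 (stepN_chain (stepN_one ?_) hrun2)
            exact stepM_resume mat total r c j S p1 v1
        · refine ⟨0, by omega, ?_⟩
          rw [contM_pop hj, hrestore]
          rfl
    obtain ⟨k, hk, hrun⟩ := hloop nbrs.length 0 (by omega)
    refine ⟨1 + k, ?_, ?_⟩
    · have h1 : k ≤ nbrs.length * (costN M n + 1) := by simpa using hk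
      have h2 : nbrs.length * (costN M n + 1) ≤ M * (costN M n + 1) :=
        Nat.mul_le_mul_right _ hlen
      have h3 : costN M (n + 1) = M * costN M n + M + 1 := rfl
      have h4 : M * (costN M n + 1) = M * costN M n + M := by ring
      omega
    · exact stepN_chain (stepN_one (stepM_enter mat total r c S p v htest)) hrun


-- ---- main simulation: the machine computes exactly what A's recursion computes ----

theorem stepN_one_inl {mat : List (List (List (Int × Int)))} {total : Int}
    {s : List (Int × Int × Int) × List (Int × Int) × List (List Bool)}
    {r : Option Bool × List (Int × Int) × List (List Bool)}
    (h : stepM mat total s = .inl r) : stepN mat total 1 s = .inl r := by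
  simp only [stepN]
  rw [h]

theorem stepM_enter_true (mat : List (List (List (Int × Int)))) (total : Int)
    (r c : Int) (S : List (Int × Int × Int)) (p : List (Int × Int)) (v : List (List Bool))
    (ht : ((p ++ [(r, c)]).length : Int) = total) :
    stepM mat total ((r, c, -1) :: S, p, v)
      = .inl (some true, p ++ [(r, c)], vset v r c true) := by
  simp only [stepM]
  rw [if_pos (by norm_num : (-1 : Int) < 0), if_pos ht]

theorem GS : ∀ (f : Nat) (mat : List (List (List (Int × Int)))) (visit : List (List Bool)) (total : Int)
    (v : List (List Bool)) (p : List (Int × Int)) (S : List (Int × Int × Int)) (r c : Int),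
    Ctx mat visit →
    total = (visit.length : Int) * ((PySem.List.pyGetD visit 0 []).length : Int) →
    rowLens v = rowLens visit →
    WIn visit (r, c) → WIn mat (r, c) →
    (f = 0 → vget v r c = false) →
    total ≤ (f : Int) + (p.length : Int) →
    ∃ k ≤ costN (branchBound mat) (f + entryCount visit),
      stepN mat total k ((r, c, -1) :: S, p, v)
        = match dfsGo f mat p v r c with
          | (some b, p', v') => .inl (some b, p', v')
          | (none, p', v') => .inr (S, p', v') := by
  intro f
  induction f with
  | zero =>
    intro mat visit total v p S r c hctx htotal hrl hwv hwm hz hdep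
    have hA : dfsGo 0 mat p v r c = (none, p, v) := by simp [dfsGo]
    rw [hA, Nat.zero_add]
    exact MF (entryCount visit) mat visit total v r c S p hctx hrl hwv hwm (hz rfl)
      (falseCount_le_entryCount hrl) (by push_cast at hdep ⊢; omega)
  | succ f ihf =>
    intro mat visit total v p S r c hctx htotal hrl hwv hwm hz hdep
    have hwvv : WIn v (r, c) := WIn_congr hrl.symm hwv
    set v1 := vset v r c true with hv1
    set p1 := p ++ [(r, c)] with hp1
    set nbrs := mget mat r c with hnbrs
    set M := branchBound mat with hM
    set E := entryCount visit with hE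
    have hlen : nbrs.length ≤ M := by rw [hM]; exact mget_len_le hwm
    have hrl1 : rowLens v1 = rowLens visit := (rowLens_vset v r c true).trans hrl
    have hnb : ∀ q ∈ nbrs, WIn visit q ∧ WIn mat q := mget_ctx hctx hwm
    have hp1len : (p1.length : Int) = (p.length : Int) + 1 := by
      rw [hp1]
      push_cast [List.length_append]
      simp
    have hTT : ((v1.length : Int) * ((PySem.List.pyGetD v1 0 []).length : Int)) = total :=
      (totalOf_congr hrl1).trans htotal.symm
    by_cases hq : (p1.length : Int) = total
    · -- the success test fires in both programs
      have hA : dfsGo (f + 1) mat p v r c = (some true, p1, v1) := by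
        simp only [dfsGo]
        rw [if_pos (by rw [hTT]; exact hq)]
      rw [hA]
      refine ⟨1, costN_pos M (f + 1 + E), ?_⟩
      rw [stepN_one_inl (stepM_enter_true mat total r c S p v hq)]
    · -- both fall through to the neighbor loop
      have hA : dfsGo (f + 1) mat p v r c
          = match dfsLoop f mat nbrs p1 v1 with
            | (some b, pz, vz) => (some b, pz, vz)
            | (none, pz, vz) => (none, pz.dropLast, vset vz r c false) := by
        simp only [dfsGo]
        rw [if_neg (by rw [hTT]; exact hq)]
      have hloop : ∀ d t, nbrs.length - t ≤ d → ∀ (vc : List (List Bool)), rowLens vc = rowLens visit →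
          ∃ k ≤ (nbrs.length - t) * (costN M (f + E) + 1),
          stepN mat total k (contM mat r c S p1 vc t)
            = match dfsLoop f mat (nbrs.drop t) p1 vc with
              | (some b, pz, vz) => .inl (some b, pz, vz)
              | (none, pz, vz) => .inr (S, pz.dropLast, vset vz r c false) := by
        intro d
        induction d with
        | zero =>
          intro t hd vc hrlc
          have hj : ¬ advance vc nbrs t < nbrs.length := by
            have := advance_ge vc nbrs 0 t (by omega)
            omega
          have hdrop : nbrs.drop t = [] := List.drop_eq_nil_of_le (by omega)
          have hL : dfsLoop f mat (nbrs.drop t) p1 vc = (none, p1, vc) := by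
            rw [hdrop]; simp [dfsLoop]
          rw [hL]
          exact ⟨0, by omega, by rw [contM_pop hj]; rfl⟩
        | succ d ihd =>
          intro t hd vc hrlc
          by_cases hj : advance vc nbrs t < nbrs.length
          · set j := advance vc nbrs t with hjdef
            have htj : t ≤ j := advance_ge vc nbrs nbrs.length t (by omega)
            have hmem : nbrs[j]'hj ∈ nbrs := List.getElem_mem hj
            have hgf : vget vc (nbrs[j]'hj).1 (nbrs[j]'hj).2 = false := by
              have := advance_false vc nbrs nbrs.length t (by omega) hj
              rwa [getBang_eq hj] at this
            obtain ⟨hwq, hwqm⟩ := hnb _ hmem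
            have hwq' : WIn visit ((nbrs[j]'hj).1, (nbrs[j]'hj).2) := by simpa using hwq
            have hwqm' : WIn mat ((nbrs[j]'hj).1, (nbrs[j]'hj).2) := by simpa using hwqm
            -- A's loop skips to index j as well
            have hskip : dfsLoop f mat (nbrs.drop t) p1 vc = dfsLoop f mat (nbrs.drop j) p1 vc :=
              advance_drop f mat vc nbrs p1 nbrs.length t (by omega)
            have hcons : nbrs.drop j = nbrs[j]'hj :: nbrs.drop (j + 1) :=
              (List.getElem_cons_drop hj).symm
            have hLcons : dfsLoop f mat (nbrs.drop t) p1 vc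
                = match dfsGo f mat p1 vc (nbrs[j]'hj).1 (nbrs[j]'hj).2 with
                  | (some true, pz, vz) => (some true, pz, vz)
                  | (_, pz, vz) => dfsLoop f mat (nbrs.drop (j + 1)) pz vz := by
              rw [hskip, hcons]
              rcases hab : nbrs[j]'hj with ⟨a, b⟩
              rw [hab] at hgf
              simp [dfsLoop, hgf]
            obtain ⟨k1, hk1, hrun1⟩ := ihf mat visit total vc p1 ((r, c, (j : Int)) :: S)
              (nbrs[j]'hj).1 (nbrs[j]'hj).2 hctx htotal hrlc hwq' hwqm' (fun _ => hgf)
              (by omega)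
            rw [← hM, ← hE] at hk1
            obtain ⟨hpath, hsome, hrlA⟩ := A_facts f mat p1 vc (nbrs[j]'hj).1 (nbrs[j]'hj).2
            rcases hgo : dfsGo f mat p1 vc (nbrs[j]'hj).1 (nbrs[j]'hj).2 with ⟨res, p', v'⟩
            rw [hgo] at hrun1 hpath hsome hrlA
            simp only at hpath hsome hrlA
            cases res with
            | some bb =>
              have hbb : bb = true := hsome bb rfl
              subst hbb
              have hL : dfsLoop f mat (nbrs.drop t) p1 vc = (some true, p', v') := by
                rw [hLcons, hgo]
              rw [hL]
              refine ⟨k1, ?_, ?_⟩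
              · have h1 : costN M (f + E) + 1 ≤ (nbrs.length - t) * (costN M (f + E) + 1) :=
                  Nat.le_mul_of_pos_left _ (by omega)
                omega
              · rw [contM_push hj]
                exact hrun1
            | none =>
              have hp' : p' = p1 := hpath rfl
              rw [hp'] at hrun1
              have hL : dfsLoop f mat (nbrs.drop t) p1 vc
                  = dfsLoop f mat (nbrs.drop (j + 1)) p1 v' := by
                rw [hLcons, hgo, hp']
              obtain ⟨k2, hk2, hrun2⟩ := ihd (j + 1) (by omega) v' (hrlA.trans hrlc)
              rw [hL]
              refine ⟨k1 + (1 + k2), ?_, ?_⟩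
              · calc k1 + (1 + k2)
                    ≤ (costN M (f + E) + 1) + (nbrs.length - (j + 1)) * (costN M (f + E) + 1) := by
                      omega
                  _ = (1 + (nbrs.length - (j + 1))) * (costN M (f + E) + 1) := by
                      rw [Nat.add_mul, one_mul]
                  _ ≤ (nbrs.length - t) * (costN M (f + E) + 1) :=
                      Nat.mul_le_mul_right _ (by omega)
              · rw [contM_push hj]
                refine stepN_chain hrun1 (stepN_chain (stepN_one ?_) hrun2)
                exact stepM_resume mat total r c j S p1 v'
          · refine ⟨0, by omega, ?_⟩
            have hskip : dfsLoop f mat (nbrs.drop t) p1 vc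
                = dfsLoop f mat (nbrs.drop (advance vc nbrs t)) p1 vc :=
              advance_drop f mat vc nbrs p1 nbrs.length t (by omega)
            have hdrop : nbrs.drop (advance vc nbrs t) = [] := List.drop_eq_nil_of_le (by omega)
            have hL : dfsLoop f mat (nbrs.drop t) p1 vc = (none, p1, vc) := by
              rw [hskip, hdrop]; simp [dfsLoop]
            rw [hL, contM_pop hj]
            rfl
      obtain ⟨k, hk, hrun⟩ := hloop nbrs.length 0 (by omega) v1 hrl1
      rw [List.drop_zero] at hrun
      refine ⟨1 + k, ?_, ?_⟩
      · have h1 : k ≤ nbrs.length * (costN M (f + E) + 1) := by simpa using hk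
        have h2 : nbrs.length * (costN M (f + E) + 1) ≤ M * (costN M (f + E) + 1) :=
          Nat.mul_le_mul_right _ hlen
        have h3 : costN M (f + E + 1) = M * costN M (f + E) + M + 1 := rfl
        have h4 : M * (costN M (f + E) + 1) = M * costN M (f + E) + M := by ring
        have h5 : f + 1 + E = f + E + 1 := by omega
        rw [h5]
        omega
      · have hstep1 := stepN_chain (stepN_one (stepM_enter mat total r c S p v hq)) hrun
        rw [hstep1, hA]
        rcases dfsLoop f mat nbrs p1 v1 with ⟨res, pz, vz⟩
        cases res <;> rfl


-- ---- assembling the three Pre_dfs cases ----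

theorem quick_both (mat : List (List (List (Int × Int)))) (path : List (Int × Int))
    (visit : List (List Bool)) (r c : Int)
    (hq : (path.length : Int) + 1 = (visit.length : Int) * ((PySem.List.pyGetD visit 0 []).length : Int)) :
    dfs mat path visit r c = dfs_alt mat path visit r c := by
  have hlen : ((path ++ [(r, c)]).length : Int) = (path.length : Int) + 1 := by
    push_cast [List.length_append]
    simp
  have hT : ((path ++ [(r, c)]).length : Int)
      = (visit.length : Int) * ((PySem.List.pyGetD visit 0 []).length : Int) := by
    rw [hlen]; exact hq
  have hcond : ((path ++ [(r, c)]).length : Int)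
      = ((vset visit r c true).length : Int) * ((PySem.List.pyGetD (vset visit r c true) 0 []).length : Int) := by
    rw [hT]; exact (totalOf_congr (rowLens_vset visit r c true)).symm
  have hA : dfs mat path visit r c = some true := by
    simp only [dfs, dfsGo]
    rw [if_pos hcond]
  have hB : dfs_alt mat path visit r c = some true := by
    simp only [dfs_alt]
    rw [runM_of_stepN mat _ 1 _ _ (stepN_one_inl (stepM_enter_true mat _ r c [] path visit hT))
      (fuelM mat visit) (by unfold fuelM; omega)]
  rw [hA, hB]

theorem shallow_both (mat : List (List (List (Int × Int)))) (path : List (Int × Int))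
    (visit : List (List Bool)) (r c : Int)
    (hq : ¬ ((path.length : Int) + 1 = (visit.length : Int) * ((PySem.List.pyGetD visit 0 []).length : Int)))
    (hnbT : ∀ q ∈ mget mat r c, vget visit q.1 q.2 = true) :
    dfs mat path visit r c = dfs_alt mat path visit r c := by
  have hlen : ((path ++ [(r, c)]).length : Int) = (path.length : Int) + 1 := by
    push_cast [List.length_append]
    simp
  have hT : ¬ ((path ++ [(r, c)]).length : Int)
      = (visit.length : Int) * ((PySem.List.pyGetD visit 0 []).length : Int) := by
    rw [hlen]; exact hq
  have hcond : ¬ ((path ++ [(r, c)]).length : Int)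
      = ((vset visit r c true).length : Int) * ((PySem.List.pyGetD (vset visit r c true) 0 []).length : Int) := by
    rw [(totalOf_congr (rowLens_vset visit r c true)) ]
    exact hT
  have hmono : ∀ q ∈ mget mat r c, vget (vset visit r c true) q.1 q.2 = true :=
    fun q hq' => vget_vset_true_mono visit r c q.1 q.2 (hnbT q hq')
  have hA : dfs mat path visit r c = none := by
    simp only [dfs, dfsGo]
    rw [if_neg hcond, dfsLoop_skip _ _ _ _ _ hmono]
  have hadv : advance (vset visit r c true) (mget mat r c) 0 = (mget mat r c).length :=
    advance_all (vset visit r c true) (mget mat r c)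
      (fun i h => hmono _ (List.getElem_mem h)) (mget mat r c).length 0 (by omega) (by omega)
  have hpop : contM mat r c [] (path ++ [(r, c)]) (vset visit r c true) 0
      = ([], (path ++ [(r, c)]).dropLast, vset (vset visit r c true) r c false) :=
    contM_pop (by rw [hadv]; omega)
  have hleg2 : stepN mat ((visit.length : Int) * ((PySem.List.pyGetD visit 0 []).length : Int)) 1
      (contM mat r c [] (path ++ [(r, c)]) (vset visit r c true) 0)
      = .inl (none, (path ++ [(r, c)]).dropLast, vset (vset visit r c true) r c false) := by
    rw [hpop]
    exact stepN_one_inl rfl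
  have hfin : stepN mat ((visit.length : Int) * ((PySem.List.pyGetD visit 0 []).length : Int)) 2
      ([(r, c, -1)], path, visit)
      = .inl (none, (path ++ [(r, c)]).dropLast, vset (vset visit r c true) r c false) :=
    stepN_chain (stepN_one (stepM_enter mat _ r c [] path visit hT)) hleg2
  have hB : dfs_alt mat path visit r c = none := by
    simp only [dfs_alt]
    rw [runM_of_stepN mat _ 2 _ _ hfin
      (fuelM mat visit) (by unfold fuelM; have := costN_pos (branchBound mat) (visit.length * (PySem.List.pyGetD visit 0 []).length + 1 + entryCount visit); omega)]
  rw [hA, hB]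

-- ===== VERDICT (by name: the statement is the Claim_ definition above) =====
theorem dfs_spec : Claim_equal_dfs := by
  intro mat path visit r c _ hpre
  obtain ⟨hwv, hdisj⟩ := hpre
  show dfs mat path visit r c = dfs_alt mat path visit r c
  rcases hdisj with hq | ⟨hwm, hnb⟩ | ⟨hwm, hctx⟩
  · exact quick_both mat path visit r c hq
  · by_cases hq : (path.length : Int) + 1
        = (visit.length : Int) * ((PySem.List.pyGetD visit 0 []).length : Int)
    · exact quick_both mat path visit r c hq
    · exact shallow_both mat path visit r c hq (fun q hq' => (hnb q hq').2)
  · -- the fully well-formed case: the machine simulates the recursion exactly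
    set CN := visit.length * (PySem.List.pyGetD visit 0 []).length with hCN
    set T := (visit.length : Int) * ((PySem.List.pyGetD visit 0 []).length : Int) with hT
    have hTC : T = (CN : Int) := by rw [hT, hCN]; push_cast; ring
    obtain ⟨k, hk, hrun⟩ := GS (CN + 1) mat visit T visit path [] r c
      (fun mrow hmr cell hc p hp => hctx mrow hmr cell hc p hp) hT rfl hwv hwm
      (fun h => absurd h (Nat.succ_ne_zero CN))
      (by rw [hTC]; push_cast; omega)
    have hfuel : fuelM mat visit = costN (branchBound mat) (CN + 1 + entryCount visit) + 1 := rfl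
    rcases hgo : dfsGo (CN + 1) mat path visit r c with ⟨res, p', v'⟩
    rw [hgo] at hrun
    cases res with
    | some bb =>
      have hrun' : stepN mat T k ([(r, c, -1)], path, visit) = .inl (some bb, p', v') := hrun
      have hA : dfs mat path visit r c = some bb := by
        simp only [dfs, ← hCN, hgo]
      have hB : dfs_alt mat path visit r c = some bb := by
        simp only [dfs_alt, ← hT]
        rw [runM_of_stepN mat T k _ _ hrun' (fuelM mat visit) (by rw [hfuel]; omega)]
      rw [hA, hB]
    | none =>
      have hrun' : stepN mat T k ([(r, c, -1)], path, visit) = .inr ([], p', v') := hrun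
      have hfin : stepN mat T (k + 1) ([(r, c, -1)], path, visit) = .inl (none, p', v') :=
        stepN_chain hrun' (stepN_one_inl rfl)
      have hA : dfs mat path visit r c = none := by
        simp only [dfs, ← hCN, hgo]
      have hB : dfs_alt mat path visit r c = none := by
        simp only [dfs_alt, ← hT]
        rw [runM_of_stepN mat T (k + 1) _ _ hfin (fuelM mat visit) (by rw [hfuel]; omega)]
      rw [hA, hB]
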